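-- pv_equiv track=rewrite | github.com/pypi-data/pypi-mirror-292 | packages/jpcli/jpcli-0.3.0.tar.gz/jpcli-0.3.0/jpcli/parsers/cpuinfo_parser.py | parse
-- ===== SOURCE A (Python) =====
-- def parse(command_output):
--     """
--     Parses the output of the 'cat /proc/cpuinfo' command into a list of dictionaries,
--     where each dictionary contains information about one processor core.
--
--     Args:
--     command_output (str): The string output from the 'cat /proc/cpuinfo' command.
--
--     Returns:
--     list: A list of dictionaries, each representing a CPU core's information.
--     """
--     processors = []
--     current_processor = {}
--     lines = command_output.splitlines()
--     for line in lines: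
--         line = line.strip()  # Remove leading and trailing whitespace
--         if line:
--             key_value_pair = line.split(':', 1)  # Split only on the first colon
--             if len(key_value_pair) == 2:
--                 key, value = key_value_pair
--                 key = key.strip()
--                 value = value.strip()
--                 current_processor[key] = value
--         else:
--             # Handle new processor block (empty line)
--             if current_processor:
--                 processors.append(current_processor)
--                 current_processor = {}
--     if current_processor:
--         processors.append(current_processor)
--     return processors
-- ===== SOURCE B (Python) =====
-- def parse(command_output):
--     """Two-phase reimplementation: segment stripped lines into maximal runs of
--     non-empty lines, then parse each run into a dict and keep the non-empty ones."""
--     lines = [line.strip() for line in command_output.splitlines()]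
--     groups = []
--     rest = lines
--     while rest:
--         if rest[0]:
--             k = 0
--             while k < len(rest) and rest[k]:
--                 k += 1
--             groups.append(rest[:k])
--             rest = rest[k:]
--         else:
--             rest = rest[1:]
--     records = []
--     for group in groups:
--         rec = {}
--         for line in group:
--             key, sep, value = line.partition(':')
--             if sep:
--                 rec[key.strip()] = value.strip()
--         if rec:
--             records.append(rec)
--     return records
-- ===== Notes on version B (the rewrite author's own statement) =====
-- stated objective: alternative
-- what changed: Replaces A's single stateful pass (a current-dict accumulator flushed at blank lines) by a two-phase structure: first segment the stripped lines into maximal runs of non-empty lines with a two-pointer scan, then parse each run into a dict via str.partition and keep the non-empty records.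
import Mathlib
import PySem

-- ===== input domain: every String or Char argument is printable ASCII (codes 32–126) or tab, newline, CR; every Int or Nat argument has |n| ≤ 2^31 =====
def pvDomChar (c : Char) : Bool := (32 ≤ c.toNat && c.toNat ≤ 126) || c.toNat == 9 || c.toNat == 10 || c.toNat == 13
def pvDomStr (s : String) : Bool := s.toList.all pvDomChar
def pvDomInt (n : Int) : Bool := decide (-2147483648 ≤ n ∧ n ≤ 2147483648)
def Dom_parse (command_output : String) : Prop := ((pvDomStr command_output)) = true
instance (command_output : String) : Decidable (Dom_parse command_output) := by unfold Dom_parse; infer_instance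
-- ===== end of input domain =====

-- B re-decomposes A's single stateful pass into segment-then-parse phases (same asymptotic cost; objective: alternative decomposition).

-- ===== PORT A =====
def parse (command_output : String) : List (List (String × String)) :=
  let lines := PySem.Str.splitlines command_output
  let st := lines.foldl
    (fun (st : List (List (String × String)) × PySem.Dict String String) line =>
      let line := PySem.Str.strip line
      if line ≠ "" then
        let kv := (PySem.Str.splitMax? line ":" 1).getD []
        if kv.length = 2 then
          (st.1, st.2.insert (PySem.Str.strip (kv.getD 0 "")) (PySem.Str.strip (kv.getD 1 "")))
        else st
      else
        if st.2.items ≠ [] then (st.1 ++ [st.2.items], (∅ : PySem.Dict String String)) else st)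
    ([], (∅ : PySem.Dict String String))
  if st.2.items ≠ [] then st.1 ++ [st.2.items] else st.1

-- ===== PORT B =====
-- phase 1 of Source B: the while loop over `rest` collecting maximal runs of non-empty lines
def groupsOf : List String → List (List String)
  | [] => []
  | l :: ls =>
    if l ≠ "" then
      ((l :: ls).takeWhile (· ≠ "")) :: groupsOf ((l :: ls).dropWhile (· ≠ ""))
    else groupsOf ls
termination_by ls => ls.length
decreasing_by
  · simp only [List.dropWhile_cons]
    split
    · exact Nat.lt_succ_of_le (List.length_dropWhile_le _ _)
    · simp_all
  · exact Nat.lt_succ_self _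

-- one line of a group: line.partition(':'), insert when the separator was found
def recLineInsert (d : PySem.Dict String String) (line : String) : PySem.Dict String String :=
  let cs := line.toList
  if cs.contains ':' then
    d.insert (String.ofList (PySem.Chars.strip (cs.takeWhile (· ≠ ':'))))
             (String.ofList (PySem.Chars.strip ((cs.dropWhile (· ≠ ':')).tail)))
  else d

def recordOf (g : List String) : PySem.Dict String String := g.foldl recLineInsert ∅

def parse_alt (command_output : String) : List (List (String × String)) :=
  let lines := (PySem.Str.splitlines command_output).map PySem.Str.strip
  ((((groupsOf lines).map recordOf).filter (fun d => !d.items.isEmpty)).map (·.items))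

-- ===== PRECONDITION & SPEC =====
def Spec_parse (command_output : String) (out : List (List (String × String))) : Prop := out = parse_alt command_output
instance (command_output : String) (out : List (List (String × String))) : Decidable (Spec_parse command_output out) := by unfold Spec_parse; infer_instance

-- ===== CLAIM (what is proved, stated in full; the proofs are below) =====
def Claim_equal_parse : Prop := ∀ (command_output : String), Dom_parse command_output → Spec_parse command_output (parse command_output)

-- ===== LEMMAS AND PROOFS =====

-- A's loop body on an already-stripped line
def stepA (st : List (List (String × String)) × PySem.Dict String String) (l : String) :
    List (List (String × String)) × PySem.Dict String String :=
  if l ≠ "" then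
    let kv := (PySem.Str.splitMax? l ":" 1).getD []
    if kv.length = 2 then
      (st.1, st.2.insert (PySem.Str.strip (kv.getD 0 "")) (PySem.Str.strip (kv.getD 1 "")))
    else st
  else
    if st.2.items ≠ [] then (st.1 ++ [st.2.items], (∅ : PySem.Dict String String)) else st

def finalizeA (st : List (List (String × String)) × PySem.Dict String String) :
    List (List (String × String)) :=
  if st.2.items ≠ [] then st.1 ++ [st.2.items] else st.1

-- records produced by the still-open dictionary `cur` followed by the remaining stripped lines
lemma items_empty : (∅ : PySem.Dict String String).items = [] := rfl

def tailRecs (cur : PySem.Dict String String) : List String → List (List (String × String))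
  | [] => if cur.items ≠ [] then [cur.items] else []
  | l :: ls =>
    if l ≠ "" then tailRecs (recLineInsert cur l) ls
    else (if cur.items ≠ [] then [cur.items] else []) ++ tailRecs ∅ ls

lemma go_zero (l : List Char) (acc : List (List Char)) :
    PySem.Chars.splitOnMax.go [':'] 0 0 l [] acc = (l :: acc).reverse := by
  simp [PySem.Chars.splitOnMax.go]

lemma go_zero' (fuel : Nat) (l : List Char) (acc : List (List Char)) :
    PySem.Chars.splitOnMax.go [':'] fuel 0 l [] acc = (l :: acc).reverse := by
  cases fuel with
  | zero => exact go_zero l acc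
  | succ n => cases l <;> simp [PySem.Chars.splitOnMax.go]

lemma go_one (fuel : Nat) (cs cur : List Char) (acc : List (List Char)) (h : cs.length < fuel) :
    PySem.Chars.splitOnMax.go [':'] fuel 1 cs cur acc =
      if ':' ∈ cs then
        ((cs.dropWhile (· ≠ ':')).tail :: (cur.reverse ++ cs.takeWhile (· ≠ ':')) :: acc).reverse
      else ((cur.reverse ++ cs) :: acc).reverse := by
  induction fuel generalizing cs cur acc with
  | zero => omega
  | succ n ih =>
    cases cs with
    | nil => simp [PySem.Chars.splitOnMax.go]
    | cons c rest =>
      by_cases hc : c = ':'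
      · subst hc
        simp [PySem.Chars.splitOnMax.go, List.isPrefixOf, go_zero']
      · have : (List.isPrefixOf [':'] (c :: rest)) = false := by
          simp [List.isPrefixOf]; intro h'; exact absurd h'.symm hc
        simp only [PySem.Chars.splitOnMax.go, this]
        rw [ih rest (c :: cur) acc (by simpa using Nat.lt_of_succ_lt_succ h)]
        simp [hc]
        split <;> simp_all [Ne.symm hc]

lemma split1_colon (cs : List Char) :
    PySem.Chars.splitOnMax cs [':'] 1 =
      if ':' ∈ cs then [cs.takeWhile (· ≠ ':'), (cs.dropWhile (· ≠ ':')).tail] else [cs] := by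
  unfold PySem.Chars.splitOnMax
  rw [if_neg (by omega)]
  have h1 : (1 : Int).toNat = 1 := rfl
  rw [h1, go_one (cs.length + 1) cs [] [] (Nat.lt_succ_self _)]
  split <;> rfl

lemma insert_eq (d : PySem.Dict String String) (l : String) :
    (if ((PySem.Str.splitMax? l ":" 1).getD []).length = 2 then
       d.insert (PySem.Str.strip (((PySem.Str.splitMax? l ":" 1).getD []).getD 0 ""))
                (PySem.Str.strip (((PySem.Str.splitMax? l ":" 1).getD []).getD 1 ""))
     else d) = recLineInsert d l := by
  have hcolon : (":" : String).toList = [':'] := rfl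
  have hsplit : PySem.Str.splitMax? l ":" 1 =
      some (List.map String.ofList
        (if ':' ∈ l.toList then
          [l.toList.takeWhile (· ≠ ':'), (l.toList.dropWhile (· ≠ ':')).tail]
        else [l.toList])) := by
    simp [PySem.Str.splitMax?, PySem.Chars.splitMax?, hcolon, split1_colon]
  simp only [hsplit, Option.getD_some]
  by_cases hc : ':' ∈ l.toList
  · simp [hc, recLineInsert, PySem.Str.strip]
  · simp [hc, recLineInsert]

lemma fold_eq (ls : List String)
    (procs : List (List (String × String))) (cur : PySem.Dict String String) :
    finalizeA (ls.foldl stepA (procs, cur)) = procs ++ tailRecs cur ls := by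
  induction ls generalizing procs cur with
  | nil =>
    simp only [List.foldl_nil, finalizeA, tailRecs]
    split <;> simp
  | cons l ls ih =>
    by_cases hl : l = ""
    · subst hl
      by_cases hcur : cur.items = []
      · have hstep : stepA (procs, cur) "" = (procs, cur) := by
          simp [stepA, hcur]
        have hcur' : cur = ∅ := PySem.Dict.ext hcur
        rw [List.foldl_cons, hstep, ih]
        simp [tailRecs, hcur', items_empty]
      · have hstep : stepA (procs, cur) "" = (procs ++ [cur.items], ∅) := by
          simp [stepA, hcur]
        rw [List.foldl_cons, hstep, ih]
        simp [tailRecs, hcur]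
    · have hstep : stepA (procs, cur) l = (procs, recLineInsert cur l) := by
        simp only [stepA]
        rw [if_pos (show l ≠ "" from hl), ← insert_eq cur l]
        split <;> rfl
      rw [List.foldl_cons, hstep, ih]
      simp [tailRecs, hl]

lemma tailRecs_run (ls : List String) (cur : PySem.Dict String String) :
    tailRecs cur ls =
      (if ((ls.takeWhile (· ≠ "")).foldl recLineInsert cur).items ≠ [] then
        [((ls.takeWhile (· ≠ "")).foldl recLineInsert cur).items] else []) ++
        tailRecs ∅ (ls.dropWhile (· ≠ "")) := by
  induction ls generalizing cur with
  | nil => simp [tailRecs, items_empty]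
  | cons l ls ih =>
    by_cases hl : l = ""
    · subst hl
      simp [tailRecs, items_empty]
    · simp only [tailRecs, if_pos hl, List.takeWhile_cons, List.dropWhile_cons]
      simp only [hl, decide_not]
      rw [ih]
      simp [hl]

lemma filter_head (d : PySem.Dict String String) (rest : List (PySem.Dict String String)) :
    (if d.items ≠ [] then [d.items] else []) ++
        (rest.filter (fun d => !d.items.isEmpty)).map (·.items) =
      ((d :: rest).filter (fun d => !d.items.isEmpty)).map (·.items) := by
  by_cases hd : d.items = [] <;> simp [List.filter_cons, hd]

lemma tailRecs_empty (ls : List String) :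
    tailRecs ∅ ls = (((groupsOf ls).map recordOf).filter (fun d => !d.items.isEmpty)).map (·.items) := by
  induction ls using groupsOf.induct with
  | case1 => simp [tailRecs, groupsOf, items_empty]
  | case2 l ls hl ih =>
    rw [tailRecs_run, groupsOf, if_pos hl, ih, List.map_cons]
    rw [show recordOf ((l :: ls).takeWhile (· ≠ "")) =
        ((l :: ls).takeWhile (· ≠ "")).foldl recLineInsert ∅ from rfl]
    rw [filter_head]
  | case3 l ls hl ih =>
    rw [groupsOf]
    simp only [if_neg hl]
    have : l = "" := by by_contra h; exact hl h
    subst this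
    simp [tailRecs, ih, items_empty]

-- ===== VERDICT (by name: the statement is the Claim_ definition above) =====
theorem parse_spec : Claim_equal_parse := by
  intro s _
  unfold Spec_parse
  have hA : parse s =
      finalizeA (((PySem.Str.splitlines s).map PySem.Str.strip).foldl stepA ([], ∅)) := by
    simp [parse, finalizeA, stepA, List.foldl_map]
  rw [hA, fold_eq, tailRecs_empty]
  simp [parse_alt]
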